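-- pv_equiv track=rewrite | github.com/ZachAlford/GeneticAlgorithmMiniProject2 | GA.py | Int2BitString
-- ===== SOURCE A (Python) =====
-- def Int2BitString(Int, NumberOfGeneDigits): ## example Int2BitString(128) -> '10000000'
--     IntIsNegative = Int < 0
--     BitString = (bin(Int))[2:]
--     if IntIsNegative:
--         BitString = (bin(Int)[3:])
--     else:
--         BitString = (bin(Int)[2:])
--     # BitString is as short as 1 character, so pad 0's until len(BitString) == GeneLength
--     while len(BitString) < NumberOfGeneDigits:
--         BitString = '0' + BitString
--     if IntIsNegative:
--         BitString = '1' + BitString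
--     else:
--         BitString = '0' + BitString
--     return BitString
-- ===== SOURCE B (Python) =====
-- def Int2BitString(Int, NumberOfGeneDigits):
--     m = -Int if Int < 0 else Int
--     bits = []
--     while m:
--         bits.append('1' if m & 1 else '0')
--         m >>= 1
--     s = ''.join(reversed(bits)) or '0'
--     pad = NumberOfGeneDigits - len(s)
--     if pad > 0:
--         s = '0' * pad + s
--     return ('1' if Int < 0 else '0') + s
-- ===== Notes on version B (the rewrite author's own statement) =====
-- stated objective: faster
-- what changed: Replaces bin()+slicing with an explicit divide-by-2 bit-collection loop, and replaces the one-character-at-a-time while-loop prepending (quadratic in the pad width) with a single arithmetic '0'*pad padding.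
import Mathlib
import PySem

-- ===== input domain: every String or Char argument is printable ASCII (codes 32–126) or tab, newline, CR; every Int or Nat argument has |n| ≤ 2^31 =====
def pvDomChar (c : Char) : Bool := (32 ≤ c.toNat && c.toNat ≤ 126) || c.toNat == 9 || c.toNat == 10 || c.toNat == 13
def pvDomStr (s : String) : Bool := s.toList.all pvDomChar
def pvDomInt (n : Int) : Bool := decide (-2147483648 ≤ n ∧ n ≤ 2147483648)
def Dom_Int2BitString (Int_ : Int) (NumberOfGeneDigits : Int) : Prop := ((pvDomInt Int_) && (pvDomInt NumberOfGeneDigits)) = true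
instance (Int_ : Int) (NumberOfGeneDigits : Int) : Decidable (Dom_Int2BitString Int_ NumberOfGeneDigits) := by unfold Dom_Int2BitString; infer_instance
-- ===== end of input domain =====

-- B replaces bin()+slicing by an explicit divide-by-2 bit loop and the char-by-char padding
-- while-loop by one arithmetic '0'*pad prepend (objective: faster).

-- ===== PORT A =====
-- bin(n)[2:] for n ≥ 0 / bin(n)[3:] for n < 0: binary digits of the magnitude, MSB first
-- ("0" for 0); the first argument is fuel making the repeated halving structural (n+1 always suffices)
def binNatGo : Nat → Nat → List Char
  | 0, _ => []
  | fuel + 1, n => if n = 0 then [] else binNatGo fuel (n / 2) ++ [if n % 2 = 1 then '1' else '0']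

def binSlice (n : Nat) : List Char := if n = 0 then ['0'] else binNatGo (n + 1) n

-- the while-loop: prepend '0' one at a time while len < NumberOfGeneDigits (fuel = the
-- iteration count, a totality guard; the loop condition is still tested each round)
def padGo : Nat → List Char → Int → List Char
  | 0, s, _ => s
  | fuel + 1, s, n => if (s.length : Int) < n then padGo fuel ('0' :: s) n else s

def Int2BitString (Int_ : Int) (NumberOfGeneDigits : Int) : String :=
  let IntIsNegative := Int_ < 0
  let BitString := if IntIsNegative then binSlice (-Int_).toNat else binSlice Int_.toNat
  let BitString := padGo (NumberOfGeneDigits - BitString.length).toNat BitString NumberOfGeneDigits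
  if IntIsNegative then String.mk ('1' :: BitString) else String.mk ('0' :: BitString)

-- ===== PORT B =====
-- the while m: loop, appending ('1' if m & 1 else '0'): LSB-first digit list (fuel as above)
def bitsGo : Nat → Nat → List Char
  | 0, _ => []
  | fuel + 1, m => if m = 0 then [] else (if m % 2 = 1 then '1' else '0') :: bitsGo fuel (m / 2)

def Int2BitString_alt (Int_ : Int) (NumberOfGeneDigits : Int) : String :=
  let m : Nat := (if Int_ < 0 then -Int_ else Int_).toNat
  let s := (bitsGo (m + 1) m).reverse
  let s := if s = [] then ['0'] else s          -- ''.join(reversed(bits)) or '0'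
  let pad := NumberOfGeneDigits - s.length
  let s := if 0 < pad then List.replicate pad.toNat '0' ++ s else s
  String.mk ((if Int_ < 0 then '1' else '0') :: s)

-- ===== PRECONDITION & SPEC =====
def Spec_Int2BitString (Int_ : Int) (NumberOfGeneDigits : Int) (out : String) : Prop := out = Int2BitString_alt Int_ NumberOfGeneDigits
instance (Int_ : Int) (NumberOfGeneDigits : Int) (out : String) : Decidable (Spec_Int2BitString Int_ NumberOfGeneDigits out) := by unfold Spec_Int2BitString; infer_instance

-- ===== CLAIM (what is proved, stated in full; the proofs are below) =====
def Claim_equal_Int2BitString : Prop := ∀ (Int_ : Int) (NumberOfGeneDigits : Int), Dom_Int2BitString Int_ NumberOfGeneDigits → Spec_Int2BitString Int_ NumberOfGeneDigits (Int2BitString Int_ NumberOfGeneDigits)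

-- ===== LEMMAS AND PROOFS =====
theorem bitsGo_reverse (f : Nat) : ∀ n : Nat, (bitsGo f n).reverse = binNatGo f n := by
  induction f with
  | zero => intro n; simp [bitsGo, binNatGo]
  | succ f ih =>
    intro n
    by_cases h : n = 0
    · simp [bitsGo, binNatGo, h]
    · simp [bitsGo, binNatGo, h, ih (n / 2)]

theorem binNatGo_ne_nil (f n : Nat) (h : n ≠ 0) : binNatGo (f + 1) n ≠ [] := by
  simp [binNatGo, h]

theorem padGo_eq (n : Int) : ∀ (k : Nat) (s : List Char), k = (n - s.length).toNat →
    padGo k s n = List.replicate k '0' ++ s := by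
  intro k
  induction k with
  | zero => intro s _; simp [padGo]
  | succ k ih =>
    intro s hk
    have hlt : (s.length : Int) < n := by omega
    have hk' : k = (n - (('0' :: s).length : Int)).toNat := by simp; omega
    simp only [padGo, hlt, if_true]
    rw [ih ('0' :: s) hk', List.replicate_succ']
    simp

theorem Int2BitString_spec : Claim_equal_Int2BitString := by
  unfold Claim_equal_Int2BitString Spec_Int2BitString
  intro Int_ N _
  have hbits : ∀ m : Nat,
      (if (bitsGo (m + 1) m).reverse = [] then ['0'] else (bitsGo (m + 1) m).reverse) = binSlice m := by
    intro m
    rw [bitsGo_reverse]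
    by_cases h : m = 0
    · simp [binNatGo, binSlice, h]
    · simp [binSlice, h, binNatGo_ne_nil m m h]
  have hpad : ∀ m : Nat,
      padGo (N - ((binSlice m).length : Int)).toNat (binSlice m) N =
      (if 0 < N - ((binSlice m).length : Int) then
        List.replicate (N - ((binSlice m).length : Int)).toNat '0' ++ binSlice m
      else binSlice m) := by
    intro m
    rw [padGo_eq N _ (binSlice m) rfl]
    split_ifs with h
    · rfl
    · have h0 : (N - ((binSlice m).length : Int)).toNat = 0 := by omega
      simp [h0]
  by_cases hneg : Int_ < 0 <;>
    simp only [Int2BitString, Int2BitString_alt, hneg, if_true, if_false, hbits, hpad]
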